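-- pv_equiv track=rewrite | github.com/janael-pinheiro/hacker_hank_solutions | hacker_hank/two_characters.py | create_characters_counter
-- ===== SOURCE A (Python) =====
-- from typing import Dict, Tuple, List
--
-- def create_characters_counter(s: str) -> Dict[str, Tuple[int, List]]:
--     counter = {}
--     for index, character in enumerate(s):
--         c = counter.get(character, (0, []))
--         new_count = c[0] + 1
--         new_list = c[1] + [index]
--         counter[character] = (new_count, new_list)
--     return counter
-- ===== SOURCE B (Python) =====
-- def create_characters_counter(s):
--     counter = {}
--     for character in dict.fromkeys(s):
--         indices = [index for index, x in enumerate(s) if x == character]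
--         counter[character] = (len(indices), indices)
--     return counter
-- ===== Notes on version B (the rewrite author's own statement) =====
-- stated objective: alternative
-- what changed: B iterates over the distinct characters in first-appearance order and gathers each character's indices by a fresh scan of enumerate(s), deriving the count as the index list's length, instead of A's single pass maintaining (count, list) pairs with a fresh list concatenation per character.
import Mathlib
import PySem

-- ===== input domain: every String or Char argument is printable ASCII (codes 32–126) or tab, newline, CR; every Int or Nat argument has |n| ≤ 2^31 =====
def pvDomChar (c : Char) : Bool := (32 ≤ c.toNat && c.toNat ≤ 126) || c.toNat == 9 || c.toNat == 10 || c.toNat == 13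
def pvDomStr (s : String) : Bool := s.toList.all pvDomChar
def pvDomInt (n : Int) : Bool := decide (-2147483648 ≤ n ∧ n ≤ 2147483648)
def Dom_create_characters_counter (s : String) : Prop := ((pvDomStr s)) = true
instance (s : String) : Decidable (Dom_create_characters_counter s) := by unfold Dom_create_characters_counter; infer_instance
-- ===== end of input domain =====

-- B iterates over the distinct characters in first-appearance order and gathers each
-- character's indices by a scan of enumerate(s), taking the count from the index list's
-- length, instead of A's single pass maintaining (count, list) pairs per character
-- (objective: alternative).

-- ===== PORT A =====
def create_characters_counter (s : String) : List (String × Int × List Int) :=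
  ((PySem.List.enumerate s.toList).foldl
    (fun counter p =>
      let c := counter.getD (String.ofList [p.2]) ((0 : Int), ([] : List Int))
      counter.insert (String.ofList [p.2]) (c.1 + 1, c.2 ++ [p.1]))
    PySem.Dict.empty).items

-- ===== PORT B =====
-- 'for character in dict.fromkeys(s)' iterates the distinct characters in
-- first-appearance order: PySem.List.dedup (exact).
def create_characters_counter_alt (s : String) : List (String × Int × List Int) :=
  ((PySem.List.dedup s.toList).foldl
    (fun counter c =>
      let indices := ((PySem.List.enumerate s.toList).filter (fun p => p.2 == c)).map (·.1)
      counter.insert (String.ofList [c]) ((indices.length : Int), indices))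
    PySem.Dict.empty).items

-- ===== PRECONDITION & SPEC =====
def Spec_create_characters_counter (s : String) (out : List (String × Int × List Int)) : Prop := out = create_characters_counter_alt s
instance (s : String) (out : List (String × Int × List Int)) : Decidable (Spec_create_characters_counter s out) := by unfold Spec_create_characters_counter; infer_instance

-- ===== CLAIM (what is proved, stated in full; the proofs are below) =====
def Claim_equal_create_characters_counter : Prop := ∀ (s : String), Dom_create_characters_counter s → Spec_create_characters_counter s (create_characters_counter s)

-- ===== LEMMAS AND PROOFS =====

/-- The single-character string A and B use as the dict key. -/
def pvKey (c : Char) : String := String.ofList [c]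

theorem pvKey_inj {a b : Char} (h : pvKey a = pvKey b) : a = b := by
  have := congrArg String.toList h
  simpa [pvKey] using this

/-- A's accumulated entry for character `c`: its count and index list come from a
    filter of the enumerated pairs. -/
theorem pv_getD_fold (l : List (Int × Char)) (d : PySem.Dict String (Int × List Int)) (c : Char) :
    (l.foldl
      (fun counter p =>
        let v := counter.getD (String.ofList [p.2]) ((0 : Int), ([] : List Int))
        counter.insert (String.ofList [p.2]) (v.1 + 1, v.2 ++ [p.1])) d).getD
        (pvKey c) ((0 : Int), ([] : List Int))
    = ((d.getD (pvKey c) ((0 : Int), ([] : List Int))).1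
         + (((l.filter (fun p => p.2 == c)).length : Nat) : Int),
       (d.getD (pvKey c) ((0 : Int), ([] : List Int))).2
         ++ (l.filter (fun p => p.2 == c)).map (·.1)) := by
  induction l generalizing d with
  | nil => simp
  | cons p rest ih =>
    simp only [List.foldl_cons, List.filter_cons]
    rw [ih]
    by_cases h : p.2 = c
    · subst h
      rw [PySem.Dict.getD_insert]
      simp only [pvKey, beq_self_eq_true, if_true, List.length_cons, List.map_cons]
      rw [Prod.mk.injEq]
      refine ⟨by push_cast; ring, by simp⟩
    · have hk : pvKey c ≠ String.ofList [p.2] := fun hh => h (pvKey_inj hh.symm)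
      rw [PySem.Dict.getD_insert, if_neg hk]
      simp [h]

/-- Mapping an injective key through `Set.ofList`'s fold commutes. -/
theorem pv_ofList_map (xs : List Char) (s : PySem.Set Char) :
    (xs.foldl (fun t x => PySem.Set.add t (pvKey x)) (s.map pvKey))
      = (xs.foldl PySem.Set.add s).map pvKey := by
  induction xs generalizing s with
  | nil => rfl
  | cons x rest ih =>
    have hmem : pvKey x ∈ List.map pvKey s ↔ x ∈ s := by
      constructor
      · intro hx
        obtain ⟨a, ha, hk⟩ := List.mem_map.mp hx
        cases pvKey_inj hk; exact ha
      · intro hx; exact List.mem_map.mpr ⟨x, hx, rfl⟩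
    have hc : PySem.Set.contains (List.map pvKey s) (pvKey x) = PySem.Set.contains s x := by
      by_cases h : x ∈ s
      · have h' : pvKey x ∈ List.map pvKey s := hmem.mpr h
        simp [PySem.Set.contains, h, h']
      · have h' : pvKey x ∉ List.map pvKey s := fun hx => h (hmem.mp hx)
        simp [PySem.Set.contains, h, h']
    simp only [List.foldl_cons, PySem.Set.add, hc]
    by_cases h : PySem.Set.contains s x = true
    · rw [if_pos h, if_pos h]
      exact ih s
    · rw [if_neg h, if_neg h, show [pvKey x] = List.map pvKey [x] from rfl,
        ← List.map_append]
      exact ih (s ++ [x])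

-- ===== VERDICT (by name: the statement is the Claim_ definition above) =====
theorem create_characters_counter_spec : Claim_equal_create_characters_counter := by
  intro s _
  show create_characters_counter s = create_characters_counter_alt s
  unfold create_characters_counter create_characters_counter_alt
  set l := PySem.List.enumerate s.toList with hl
  -- A's dict: keys
  have hkeys :
      (l.foldl
        (fun counter p =>
          let v := counter.getD (String.ofList [p.2]) ((0 : Int), ([] : List Int))
          counter.insert (String.ofList [p.2]) (v.1 + 1, v.2 ++ [p.1]))
        PySem.Dict.empty).keys = (PySem.List.dedup s.toList).map pvKey := by
    have h1 := PySem.Dict.keys_foldl_insert_key (l := l) (key := fun p => String.ofList [p.2])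
      (f := fun counter p =>
        ((counter.getD (String.ofList [p.2]) ((0 : Int), ([] : List Int))).1 + 1,
         (counter.getD (String.ofList [p.2]) ((0 : Int), ([] : List Int))).2 ++ [p.1]))
      (d := PySem.Dict.empty)
    rw [h1]
    have h2 : l.map (fun p => String.ofList [p.2]) = (s.toList).map pvKey := by
      rw [show (fun p : Int × Char => String.ofList [p.2]) = pvKey ∘ (·.2) from rfl,
        ← List.map_map, PySem.List.map_snd_enumerate]
    simp only [PySem.Dict.keys_empty, PySem.Set.update, h2, PySem.List.dedup_eq_ofList,
      PySem.Set.ofList_eq_foldl]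
    rw [List.foldl_map]
    exact pv_ofList_map s.toList []
  have hnodup :
      (l.foldl
        (fun counter p =>
          let v := counter.getD (String.ofList [p.2]) ((0 : Int), ([] : List Int))
          counter.insert (String.ofList [p.2]) (v.1 + 1, v.2 ++ [p.1]))
        PySem.Dict.empty).keys.Nodup := by
    exact PySem.Dict.nodup_keys_foldl_insert_key l (fun p => String.ofList [p.2]) _ _
      (by simp [PySem.Dict.keys_empty])
  -- A's items as a map over the distinct characters
  rw [PySem.Dict.items_eq_map_keys _ hnodup ((0 : Int), ([] : List Int)), hkeys, List.map_map]
  -- B's items: fresh distinct keys append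
  have hdn : ((PySem.List.dedup s.toList).map (fun c => String.ofList [c])).Nodup :=
    (PySem.List.nodup_dedup s.toList).map (fun a b h => pvKey_inj h)
  rw [PySem.Dict.items_foldl_insert_fresh
      (l := PySem.List.dedup s.toList)
      (k := fun c => String.ofList [c])
      (v := fun c => (((((l.filter (fun p => p.2 == c)).map (·.1)).length : Nat) : Int),
        (l.filter (fun p => p.2 == c)).map (·.1)))
      (d := PySem.Dict.empty)
      (fun a _ => PySem.Dict.contains_empty _) hdn]
  rw [show (PySem.Dict.empty : PySem.Dict String (Int × List Int)).items = [] from rfl,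
    List.nil_append]
  apply List.map_congr_left
  intro c _
  simp only [Function.comp, pv_getD_fold l PySem.Dict.empty c]
  simp [pvKey, PySem.Dict.getD_empty]
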